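-- pv_equiv track=rewrite | github.com/rayyan2099/Wordle | pattern_matrix.py | pattern_int_to_str
-- ===== SOURCE A (Python) =====
-- def pattern_int_to_str(pattern_int: int) -> str:
--     """Convert integer pattern back to string."""
--     # Convert base-10 integer to base-3 string
--     if pattern_int == 0:
--         return "00000"
--
--     result = []
--     temp = pattern_int
--     for _ in range(5):
--         result.append(str(temp % 3))
--         temp //= 3
--
--     return ''.join(reversed(result))
-- ===== SOURCE B (Python) =====
-- def pattern_int_to_str(pattern_int: int) -> str:
--     """Convert integer pattern back to string."""
--     return ''.join(str((pattern_int // p) % 3) for p in (81, 27, 9, 3, 1))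
-- ===== Notes on version B (the rewrite author's own statement) =====
-- stated objective: idiomatic
-- what changed: Emit the five base-3 digits most-significant-first via fixed place values (n//p)%3 for p in (81,27,9,3,1), joined directly, instead of repeatedly dividing a mutable temp, appending least-significant-first and reversing; the special-case 0 branch disappears.
import Mathlib
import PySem

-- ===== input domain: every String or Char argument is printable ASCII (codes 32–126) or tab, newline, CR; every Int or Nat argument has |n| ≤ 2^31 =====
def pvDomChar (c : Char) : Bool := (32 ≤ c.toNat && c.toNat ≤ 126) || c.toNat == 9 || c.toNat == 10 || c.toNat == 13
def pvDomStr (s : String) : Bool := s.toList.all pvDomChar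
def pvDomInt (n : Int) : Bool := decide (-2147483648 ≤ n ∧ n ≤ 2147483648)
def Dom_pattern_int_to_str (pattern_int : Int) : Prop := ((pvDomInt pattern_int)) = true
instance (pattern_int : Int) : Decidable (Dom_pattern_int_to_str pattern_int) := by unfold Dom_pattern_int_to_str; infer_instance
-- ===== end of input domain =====

-- B emits the five digits most-significant-first from fixed place values, with no temp/reversal (idiomatic; same cost).
-- ===== PORT A =====
def pattern_int_to_str (pattern_int : Int) : String :=
  if pattern_int = 0 then "00000"
  else
    let st := (PySem.List.pyRange 0 5 1).foldl
      (fun (s : List String × Int) _ =>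
        (s.1 ++ [PySem.Int.toStr (PySem.Int.mod s.2 3)], PySem.Int.floordiv s.2 3))
      ([], pattern_int)
    PySem.Str.join "" st.1.reverse

-- ===== PORT B =====
def pattern_int_to_str_alt (pattern_int : Int) : String :=
  PySem.Str.join ""
    (([81, 27, 9, 3, 1] : List Int).map
      (fun p => PySem.Int.toStr (PySem.Int.mod (PySem.Int.floordiv pattern_int p) 3)))

-- ===== PRECONDITION & SPEC =====
def Spec_pattern_int_to_str (pattern_int : Int) (out : String) : Prop := out = pattern_int_to_str_alt pattern_int
instance (pattern_int : Int) (out : String) : Decidable (Spec_pattern_int_to_str pattern_int out) := by unfold Spec_pattern_int_to_str; infer_instance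

-- ===== CLAIM (what is proved, stated in full; the proofs are below) =====
def Claim_equal_pattern_int_to_str : Prop := ∀ (pattern_int : Int), Dom_pattern_int_to_str pattern_int → Spec_pattern_int_to_str pattern_int (pattern_int_to_str pattern_int)

-- ===== LEMMAS AND PROOFS =====
theorem pv_fdiv_fdiv (n a b : Int) (ha : 0 < a) (hb : 0 < b) :
    PySem.Int.floordiv (PySem.Int.floordiv n a) b = PySem.Int.floordiv n (a * b) := by
  rw [PySem.Int.floordiv_eq_ediv_of_pos ha, PySem.Int.floordiv_eq_ediv_of_pos hb,
      PySem.Int.floordiv_eq_ediv_of_pos (by positivity),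
      Int.ediv_ediv_of_nonneg (le_of_lt ha)]

-- ===== VERDICT (by name: the statement is the Claim_ definition above) =====
theorem pattern_int_to_str_spec : Claim_equal_pattern_int_to_str := by
  intro n _
  unfold Spec_pattern_int_to_str pattern_int_to_str pattern_int_to_str_alt
  by_cases h0 : n = 0
  · subst h0; decide
  · have e1 : PySem.Int.floordiv n 1 = n := by
      rw [PySem.Int.floordiv_eq_ediv_of_pos (by norm_num), Int.ediv_one]
    have e9 : PySem.Int.floordiv (PySem.Int.floordiv n 3) 3 = PySem.Int.floordiv n 9 :=
      (pv_fdiv_fdiv n 3 3 (by norm_num) (by norm_num)).trans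
        (congrArg (PySem.Int.floordiv n) (by norm_num))
    have e27 : PySem.Int.floordiv (PySem.Int.floordiv n 9) 3 = PySem.Int.floordiv n 27 :=
      (pv_fdiv_fdiv n 9 3 (by norm_num) (by norm_num)).trans
        (congrArg (PySem.Int.floordiv n) (by norm_num))
    have e81 : PySem.Int.floordiv (PySem.Int.floordiv n 27) 3 = PySem.Int.floordiv n 81 :=
      (pv_fdiv_fdiv n 27 3 (by norm_num) (by norm_num)).trans
        (congrArg (PySem.Int.floordiv n) (by norm_num))
    rw [show PySem.List.pyRange 0 5 1 = [0, 1, 2, 3, 4] from by decide]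
    simp only [if_neg h0, List.foldl, List.map, List.reverse_cons, List.reverse_nil,
      List.nil_append, List.cons_append, e1, e9, e27, e81]
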